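/-
  jsmn_d.bin: `jsmn_parse` (731 bytes at 10027AH, 231 instructions, 5 loops) — THE CUT POINTS AND THE STATE PREDICATES AT THEM, and the statement of
  every region as a `Prop`, so that every region is proved on its own (Prog/Jsmn/D/Parse*.lean) and they are composed in Prog/Jsmn/D/Parse.lean.

  REGISTERS after the prologue (10027AH – 10029DH: six pushes, sub rsp 8):  rbp = parser, r14 = js, r13 = len, r12 = tokens, r15d = count,
  [rsp+4] = num_tokens (32 bits); rsp = sp0 - 38H where sp0 = rsp on entry; the six saved registers at sp0-8 … sp0-30H. In the loop: ebx = the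
  current character (zero-extended byte), ecx = pos as loaded at the loop head (used again by the closing bracket: `add ecx, 1 ; mov [rdx+8], ecx`).

  CUT POINTS
    10046BH  LOOP HEAD   `MainInv`: Frame for a model state `s` + "the model's loop from `s` with `k` units of fuel gives the final result"
    1004F9H  the loop test failed                              `AtFinal`     → FinalSpec → AtRet
    the entry of each `case` (after the compare chain)         `AtCase`      → the case's Spec → Outcome of `Jsmn.body`
    100462H  `parser->pos++` (every `break` lands here)        `AtNext`      → NextSpec → the loop head with pos + 1
    100529H  `return r` (r in r15d; every `return` lands here) `AtRet`       → EpilogueSpec → ScanPost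
  Every case region is stated against the model's `Jsmn.body … s ch` for the dispatched character: it must reach `AtNext s'` if the body says
  `.next s'` and `AtRet r s'` if it says `.ret r s'`.
-/
import Prog.Jsmn.State
import Prog.Jsmn.CodeD
import X86.Derived.Prog.MemWords
import X86.Derived.Prog.Reach

namespace X86
namespace J6
namespace D
open X86.User (CodeAt RegsKept Span FlagsOK Layout toNat_add_ofNat toNat_ofNat_lt' add_ofNat_add)
open Jsmn

set_option linter.unusedVariables false

/-- The constants of one call of jsmn_parse. -/
structure PCtx where
  ret : Word
  pa : Word
  jsA : Word
  tb : Word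
  js : List UInt8
  numTokens : Nat
  /-- the parser state and the tokens argument on entry -/
  p0 : Parser
  toks0 : Option Tokens

/-- The number of bytes of the token array. -/
def PCtx.tlen (c : PCtx) : Nat := toksBytes Config.default c.numTokens c.toks0

/-- What jsmn_parse was called with (the hypotheses of `ParseSpec`, bundled). -/
structure Entry (c : PCtx) (n : User.Layout) (v0 : User.State) : Prop where
  pre : ScanPre binD n binD.parse binD.useParse v0 c.ret c.pa c.jsA c.tb c.js c.numTokens c.p0 c.toks0
  r8 : Word.low .w32 (v0.reg .r8) = UInt64.ofNat c.numTokens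
  inv : Inv Config.default c.p0 c.toks0 c.numTokens

/-- What holds at every cut point inside the loop, apart from RIP, the count register and the model's invariant: the registers that hold the
arguments, the stack frame (saved registers, num_tokens, return address), what memory may have changed, and the parser / tokens = the model's. -/
structure FrameCore (c : PCtx) (n : User.Layout) (v0 v : User.State) (p : Parser) (toks : Option Tokens) : Prop where
  entry : Entry c n v0
  rsp : v.reg .rsp = v0.reg .rsp - 0x38
  rbp : v.reg .rbp = c.pa
  r14 : v.reg .r14 = c.jsA
  r13 : v.reg .r13 = UInt64.ofNat c.js.length
  r12 : v.reg .r12 = c.tb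
  ntok : v.mem.readLE (v0.reg .rsp - 0x34) 4 = c.numTokens
  sv15 : v.mem.readLE (v0.reg .rsp - 0x8) 8 = (v0.reg .r15).toNat
  sv14 : v.mem.readLE (v0.reg .rsp - 0x10) 8 = (v0.reg .r14).toNat
  sv13 : v.mem.readLE (v0.reg .rsp - 0x18) 8 = (v0.reg .r13).toNat
  sv12 : v.mem.readLE (v0.reg .rsp - 0x20) 8 = (v0.reg .r12).toNat
  svbp : v.mem.readLE (v0.reg .rsp - 0x28) 8 = (v0.reg .rbp).toNat
  svbx : v.mem.readLE (v0.reg .rsp - 0x30) 8 = (v0.reg .rbx).toNat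
  retA : UInt64.ofNat (v.mem.readLE (v0.reg .rsp) 8) = c.ret
  same : SameOutside v0.mem v.mem (((v0.reg .rsp).toNat - 88, (v0.reg .rsp).toNat) :: dataWins c.pa c.tb c.tlen)
  parser : ParserAt v.mem c.pa p
  toksArg : ToksArg Config.default v.mem c.tb c.numTokens toks
  null : toks = none ↔ c.toks0 = none

/-- `FrameCore` + the count in r15d + the model's invariant: what holds for the model state `s` at the loop head, at a `case`, at `pos++`. -/
structure Frame (c : PCtx) (n : User.Layout) (v0 v : User.State) (s : St) : Prop where
  core : FrameCore c n v0 v s.p s.toks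
  r15 : v.reg .r15 = UInt64.ofNat (u32 s.count)
  cnt : -2147483648 ≤ s.count ∧ s.count < 2147483648
  inv : Inv Config.default s.p s.toks c.numTokens

/-- The loop head (10046BH): the model's loop, run from `s` with `k` units of fuel, gives `res`. -/
def MainInv (c : PCtx) (n : User.Layout) (v0 : User.State) (res : Int × St) (k : Nat) (v : User.State) : Prop :=
  v.rip = 0x10046b ∧ ∃ s, Frame c n v0 v s ∧ loop Config.default c.js c.numTokens k s = some res

/-- The loop test has failed (1004F9H). -/
def AtFinal (c : PCtx) (n : User.Layout) (v0 v : User.State) (s : St) : Prop := v.rip = 0x1004f9 ∧ Frame c n v0 v s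

/-- At the entry `addr` of a `case`: the character is in ebx (zero-extended); at the closing-bracket case (100329H, the only one that uses it) ecx still
holds pos as loaded at the loop head (on the way to the primitive / whitespace entries the bit test overwrites ecx with the character). -/
structure AtCase (c : PCtx) (n : User.Layout) (v0 v : User.State) (s : St) (addr : Word) (ch : UInt8) : Prop where
  rip : v.rip = addr
  frame : Frame c n v0 v s
  rbx : v.reg .rbx = ch.toUInt64
  rcx : addr = 0x100329 → v.reg .rcx = UInt64.ofNat s.p.pos
  more : more c.js s.p.pos = true
  ch : ch = charAt c.js s.p.pos

/-- About to do `parser->pos++` (100462H). -/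
def AtNext (c : PCtx) (n : User.Layout) (v0 v : User.State) (s : St) : Prop := v.rip = 0x100462 ∧ Frame c n v0 v s

/-- About to return `r` (100529H: `mov eax, r15d`, the epilogue). -/
def AtRet (c : PCtx) (n : User.Layout) (v0 v : User.State) (r : Int) (s : St) : Prop :=
  v.rip = 0x100529 ∧ FrameCore c n v0 v s.p s.toks ∧ Word.low .w32 (v.reg .r15) = UInt64.ofNat (u32 r)

/-- Where a case region must end, given what the model's loop body says. -/
def Outcome (c : PCtx) (n : User.Layout) (v0 v : User.State) : Option Step → Prop
  | some (.next s') => AtNext c n v0 v s'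
  | some (.ret r s') => AtRet c n v0 v r s'
  | none => False

/-- Which `case` entry the compare chain at the loop head reaches for the character `ch`. -/
def Dispatch (ch : UInt8) (addr : Word) : Prop :=
  (ch = 0x3a ∧ addr = 0x100459) ∨ (ch = 0x22 ∧ addr = 0x100416) ∨ ((ch = 0x7b ∨ ch = 0x5b) ∧ addr = 0x100344) ∨
  ((ch = 0x7d ∨ ch = 0x5d) ∧ addr = 0x100329) ∨ (ch = 0x2c ∧ addr = 0x1004a1) ∨
  ((ch = 0x09 ∨ ch = 0x0d ∨ ch = 0x0a ∨ ch = 0x20) ∧ addr = 0x100462) ∨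
  (ch ≠ 0x3a ∧ ch ≠ 0x22 ∧ ch ≠ 0x7b ∧ ch ≠ 0x5b ∧ ch ≠ 0x7d ∧ ch ≠ 0x5d ∧ ch ≠ 0x2c ∧ ch ≠ 0x09 ∧ ch ≠ 0x0d ∧ ch ≠ 0x0a ∧ ch ≠ 0x20 ∧ addr = 0x1002c3)

/-! ### The regions, as Props -/

/-- 10027AH → 10046BH: the prologue. -/
def EntrySpec (n : User.Layout) : Prop :=
  ∀ c v0, Entry c n v0 → Reach n v0 (fun v => v.rip = 0x10046b ∧ Frame c n v0 v ⟨c.p0, c.toks0, i32 c.p0.toknext⟩)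

/-- 10046BH → 1004F9H (the test fails) or the entry of the `case` of the current character (ws: straight to `pos++`). -/
def HeadSpec (n : User.Layout) : Prop :=
  ∀ c v0 v s, v.rip = 0x10046b → Frame c n v0 v s →
    Reach n v (fun v' => (more c.js s.p.pos = false ∧ AtFinal c n v0 v' s) ∨
      ∃ addr, Dispatch (charAt c.js s.p.pos) addr ∧ AtCase c n v0 v' s addr (charAt c.js s.p.pos))

/-- A `case` of the switch, entered at `addr` for the characters `ok`: it does what `Jsmn.body` says. `fuel` is what the model hands to the scans. -/
def CaseSpec (n : User.Layout) (addr : Word) (ok : UInt8 → Prop) : Prop :=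
  ∀ c v0 v s ch fuel, ok ch → AtCase c n v0 v s addr ch →
    body Config.default c.js fuel c.numTokens s ch ≠ none →
    Reach n v (fun v' => Outcome c n v0 v' (body Config.default c.js fuel c.numTokens s ch))

def ColonSpec (n : User.Layout) : Prop := CaseSpec n 0x100459 (fun ch => ch = 0x3a)
def StringSpec (n : User.Layout) : Prop := CaseSpec n 0x100416 (fun ch => ch = 0x22)
def OpenSpec (n : User.Layout) : Prop := CaseSpec n 0x100344 (fun ch => ch = 0x7b ∨ ch = 0x5b)
def CloseSpec (n : User.Layout) : Prop := CaseSpec n 0x100329 (fun ch => ch = 0x7d ∨ ch = 0x5d)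
def CommaSpec (n : User.Layout) : Prop := CaseSpec n 0x1004a1 (fun ch => ch = 0x2c)
def PrimitiveSpec (n : User.Layout) : Prop :=
  CaseSpec n 0x1002c3 (fun ch => ch ≠ 0x3a ∧ ch ≠ 0x22 ∧ ch ≠ 0x7b ∧ ch ≠ 0x5b ∧ ch ≠ 0x7d ∧ ch ≠ 0x5d ∧ ch ≠ 0x2c ∧ ch ≠ 0x09 ∧ ch ≠ 0x0d ∧ ch ≠ 0x0a ∧ ch ≠ 0x20)

/-- 100462H → 10046BH: `parser->pos++`. -/
def NextSpec (n : User.Layout) : Prop :=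
  ∀ c v0 v s, AtNext c n v0 v s →
    Reach n v (fun v' => v'.rip = 0x10046b ∧ Frame c n v0 v' { s with p := { s.p with pos := u32 (s.p.pos + 1) } })

/-- 1004F9H → 100529H: the scan for an unclosed object or array after the loop (`Jsmn.finish`). -/
def FinalSpec (n : User.Layout) : Prop :=
  ∀ c v0 v s, AtFinal c n v0 v s → Reach n v (fun v' => AtRet c n v0 v' (finish s) s)

/-- 100529H → the caller: `mov eax, r15d`, the six pops, `ret`. -/
def EpilogueSpec (n : User.Layout) : Prop :=
  ∀ c v0 v r s, AtRet c n v0 v r s →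
    Reach n v (ScanPost binD binD.useParse v0 c.ret c.pa c.tb c.numTokens c.toks0 r s.p s.toks)

end D
end J6
end X86
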